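-- pv_equiv track=rewrite | github.com/mischaikow/advent_of_code | 2016/13_code.py | part2
-- ===== SOURCE A (Python) =====
-- from collections import deque, defaultdict
--
-- def is_open_space(x: int, y: int, favorite: int) -> int:
--   encoding = x*x + 3*x + 2*x*y + y + y*y + favorite
--   ans = 0
--   while encoding > 0:
--     if encoding % 2 == 1:
--       encoding -= 1
--       ans += 1
--     encoding >>= 1
--
--   return ans % 2 == 0
--
-- def part2(designers_favorite_number: int) -> int:
--   locations = deque()
--   locations.append(((1, 1, 0)))
--   visited = set()
--
--   compass = [(0, 1), (1, 0), (0, -1), (-1, 0)]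
--
--   while len(locations) > 0:
--     point = deque.popleft(locations)
--     if not (point[0], point[1]) in visited and point[2] < 51:
--       visited.add(((point[0], point[1])))
--       for direction in compass:
--         if 0 <= point[0] + direction[0] and 0 <= point[1] + direction[1] and is_open_space(point[0] + direction[0], point[1] + direction[1], designers_favorite_number):
--           locations.append(((point[0] + direction[0], point[1] + direction[1], point[2] + 1)))
--
--   return len(visited)
-- ===== SOURCE B (Python) =====
-- def is_open_space(x: int, y: int, favorite: int) -> int:
--   encoding = x*x + 3*x + 2*x*y + y + y*y + favorite
--   ans = 0
--   while encoding > 0: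
--     if encoding % 2 == 1:
--       encoding -= 1
--       ans += 1
--     encoding >>= 1
--
--   return ans % 2 == 0
--
-- def part2(designers_favorite_number: int) -> int:
--   # dense-grid dynamic programming (bounded relaxation): no queue, no visited set,
--   # no frontier.  50 steps from (1,1) stay inside 0..51, so work on a 52x52 grid.
--   N = 52
--   open_grid = [[is_open_space(x, y, designers_favorite_number) for y in range(N)]
--                for x in range(N)]
--   reach = [[x == 1 and y == 1 for y in range(N)] for x in range(N)]
--   for _ in range(50):
--     reach = [[reach[x][y] or (open_grid[x][y] and (
--                 (x > 0 and reach[x - 1][y])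
--                 or (x + 1 < N and reach[x + 1][y])
--                 or (y > 0 and reach[x][y - 1])
--                 or (y + 1 < N and reach[x][y + 1])))
--               for y in range(N)]
--              for x in range(N)]
--   return sum(cell for row in reach for cell in row)
-- ===== Notes on version B (the rewrite author's own statement) =====
-- stated objective: alternative
-- what changed: Replaces the depth-tagged deque BFS over an unbounded sparse visited-set by dense-grid dynamic programming: fifty synchronous relaxation passes over a fixed 52x52 boolean grid (reach[x][y] |= open[x][y] and a neighbour was reached), then a count of true cells - no queue, no set, no frontier.
import Mathlib
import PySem

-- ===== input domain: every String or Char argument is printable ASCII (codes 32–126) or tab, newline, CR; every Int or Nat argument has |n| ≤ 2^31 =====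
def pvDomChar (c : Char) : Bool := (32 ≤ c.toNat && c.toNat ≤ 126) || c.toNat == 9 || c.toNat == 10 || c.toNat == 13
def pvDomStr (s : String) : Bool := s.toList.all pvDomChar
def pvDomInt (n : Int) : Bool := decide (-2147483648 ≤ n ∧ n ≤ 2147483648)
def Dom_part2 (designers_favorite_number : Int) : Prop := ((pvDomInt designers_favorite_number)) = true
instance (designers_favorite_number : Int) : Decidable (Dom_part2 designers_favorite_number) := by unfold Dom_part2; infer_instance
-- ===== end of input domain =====

-- B replaces A's depth-tagged deque BFS by dense-grid dynamic programming: 50 synchronous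
-- relaxation passes over a fixed 52x52 boolean grid (no queue, no visited set), then a
-- count of true cells; same return value, no speed claim.

-- ===== PORT A =====
-- is_open_space's popcount while-loop (shared verbatim by both Python versions)
def popLoopA (encoding ans : Int) : Int :=
  if 0 < encoding then
    if PySem.Int.mod encoding 2 == 1 then
      popLoopA (PySem.Int.floordiv (encoding - 1) 2) (ans + 1)
    else
      popLoopA (PySem.Int.floordiv encoding 2) ans
  else ans
termination_by encoding.toNat
decreasing_by
  all_goals
    simp only [PySem.Int.floordiv_eq_ediv_of_pos (by omega : (0:Int) < 2)]
    omega

def isOpenSpace (x y favorite : Int) : Bool :=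
  PySem.Int.mod (popLoopA (x*x + 3*x + 2*x*y + y + y*y + favorite) 0) 2 == 0

def compass : List (Int × Int) := [(0, 1), (1, 0), (0, -1), (-1, 0)]

-- the while-loop over the deque; the Nat argument is a fuel guard for totality only
-- (the proofs below show the chosen fuel is never exhausted)
def part2Loop (fav : Int) : Nat → List ((Int × Int) × Int) → PySem.Set (Int × Int) → Int
  | _, [], visited => PySem.Set.len visited
  | 0, _ :: _, visited => PySem.Set.len visited
  | fuel + 1, (p, d) :: rest, visited =>
    if PySem.Set.contains visited p = false ∧ d < 51 then
      part2Loop fav fuel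
        (compass.foldl (fun q dir =>
          if 0 ≤ p.1 + dir.1 ∧ 0 ≤ p.2 + dir.2 ∧
              isOpenSpace (p.1 + dir.1) (p.2 + dir.2) fav = true
          then q ++ [((p.1 + dir.1, p.2 + dir.2), d + 1)] else q) rest)
        (PySem.Set.add visited p)
    else part2Loop fav fuel rest visited

def part2 (designers_favorite_number : Int) : Int :=
  part2Loop designers_favorite_number 10000000000000000000000000000000000000000
    [(((1 : Int), (1 : Int)), (0 : Int))] PySem.Set.empty

-- ===== PORT B =====
-- open_grid / reach are 52x52 lists of rows; reach[x][y] with guarded in-range indices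
def gridGet (g : List (List Bool)) (x y : Nat) : Bool := (g.getD x []).getD y false

def openGrid (fav : Int) : List (List Bool) :=
  (List.range 52).map (fun (x : Nat) => (List.range 52).map (fun (y : Nat) => isOpenSpace (x : Int) (y : Int) fav))

-- one pass of the comprehension rebuilding reach
def stepGrid (og reach : List (List Bool)) : List (List Bool) :=
  (List.range 52).map fun x => (List.range 52).map fun y =>
    gridGet reach x y ||
      (gridGet og x y &&
        ((decide (0 < x) && gridGet reach (x - 1) y) ||
         (decide (x + 1 < 52) && gridGet reach (x + 1) y) ||
         (decide (0 < y) && gridGet reach x (y - 1)) ||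
         (decide (y + 1 < 52) && gridGet reach x (y + 1))))

def part2_alt (designers_favorite_number : Int) : Int :=
  let og := openGrid designers_favorite_number
  let init : List (List Bool) :=
    (List.range 52).map fun x => (List.range 52).map fun y => decide (x = 1) && decide (y = 1)
  let fin := (List.range 50).foldl (fun r _ => stepGrid og r) init
  -- sum of booleans = count of True cells
  (((fin.flatMap (fun row => row)).countP id : Nat) : Int)

-- ===== PRECONDITION & SPEC =====
def Spec_part2 (designers_favorite_number : Int) (out : Int) : Prop := out = part2_alt designers_favorite_number
instance (designers_favorite_number : Int) (out : Int) : Decidable (Spec_part2 designers_favorite_number out) := by unfold Spec_part2; infer_instance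

-- ===== CLAIM (what is proved, stated in full; the proofs are below) =====
def Claim_equal_part2 : Prop := ∀ (designers_favorite_number : Int), Dom_part2 designers_favorite_number → Spec_part2 designers_favorite_number (part2 designers_favorite_number)

-- ===== LEMMAS AND PROOFS =====

-- the in-bounds open neighbours of a point, in compass order
def nbrsL (fav : Int) (p : Int × Int) : List (Int × Int) :=
  [(p.1, p.2 + 1), (p.1 + 1, p.2), (p.1, p.2 - 1), (p.1 - 1, p.2)].filter
    (fun q => decide (0 ≤ q.1) && decide (0 ≤ q.2) && isOpenSpace q.1 q.2 fav)

-- process a list of candidate points against a visited set: the new set and the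
-- sublist of points that were actually new (A's per-level behaviour)
def procA (v : PySem.Set (Int × Int)) : List (Int × Int) → PySem.Set (Int × Int) × List (Int × Int)
  | [] => (v, [])
  | p :: L =>
    if PySem.Set.contains v p = false then
      let r := procA (PySem.Set.add v p) L
      (r.1, p :: r.2)
    else procA v L

def roundP (fav : Int) (s : PySem.Set (Int × Int) × List (Int × Int)) :
    PySem.Set (Int × Int) × List (Int × Int) :=
  procA s.1 (s.2.flatMap (nbrsL fav))

def iterR (fav : Int) : Nat → (PySem.Set (Int × Int) × List (Int × Int)) →
    (PySem.Set (Int × Int) × List (Int × Int))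
  | 0, s => s
  | k + 1, s => iterR fav k (roundP fav s)

-- fuel consumed by the remaining k full rounds plus the final depth-51 discard pass
def needed (fav : Int) : Nat → (PySem.Set (Int × Int) × List (Int × Int)) → Nat
  | 0, s => (s.2.flatMap (nbrsL fav)).length
  | k + 1, s => (s.2.flatMap (nbrsL fav)).length + needed fav k (roundP fav s)

lemma part2Loop_nil (fav : Int) (fuel : Nat) (v : PySem.Set (Int × Int)) :
    part2Loop fav fuel [] v = PySem.Set.len v := by
  cases fuel <;> rfl

lemma compass_foldl (fav : Int) (p : Int × Int) (d : Int) (rest : List ((Int × Int) × Int)) :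
    compass.foldl (fun q dir =>
      if 0 ≤ p.1 + dir.1 ∧ 0 ≤ p.2 + dir.2 ∧
          isOpenSpace (p.1 + dir.1) (p.2 + dir.2) fav = true
      then q ++ [((p.1 + dir.1, p.2 + dir.2), d + 1)] else q) rest
    = rest ++ (nbrsL fav p).map (fun q => (q, d + 1)) := by
  simp only [compass, nbrsL, List.foldl, List.filter_cons, List.filter_nil, Bool.and_eq_true,
    decide_eq_true_eq, add_zero, ← sub_eq_add_neg, and_assoc]
  split_ifs <;> simp_all

lemma roundLemma (fav : Int) (d : Int) (hd : d < 51) :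
    ∀ (L : List (Int × Int)) (M : List (Int × Int)) (v : PySem.Set (Int × Int)) (fuel : Nat),
    part2Loop fav (fuel + L.length)
      (L.map (fun q => (q, d)) ++ M.map (fun q => (q, d + 1))) v
    = part2Loop fav fuel
        ((M ++ (procA v L).2.flatMap (nbrsL fav)).map (fun q => (q, d + 1))) (procA v L).1 := by
  intro L
  induction L with
  | nil => intro M v fuel; simp [procA]
  | cons p L' ih =>
    intro M v fuel
    simp only [List.map_cons, List.cons_append, List.length_cons]
    rw [show fuel + (L'.length + 1) = (fuel + L'.length) + 1 from rfl]
    by_cases hv : PySem.Set.contains v p = false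
    · have hm : p ∉ v := by simpa using hv
      rw [part2Loop, if_pos ⟨hv, hd⟩, compass_foldl, List.append_assoc, ← List.map_append, ih]
      simp [procA, hm, List.append_assoc]
    · have hm : p ∈ v := by simpa using hv
      rw [part2Loop, if_neg (by simp_all), ih]
      simp [procA, hm]

lemma discardLemma (fav : Int) :
    ∀ (L : List (Int × Int)) (v : PySem.Set (Int × Int)) (fuel : Nat),
    part2Loop fav (fuel + L.length) (L.map (fun q => (q, (51 : Int)))) v = PySem.Set.len v := by
  intro L
  induction L with
  | nil => intro v fuel; exact part2Loop_nil fav fuel v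
  | cons p L' ih =>
    intro v fuel
    simp only [List.map_cons, List.length_cons]
    rw [show fuel + (L'.length + 1) = (fuel + L'.length) + 1 from rfl]
    rw [part2Loop, if_neg (by simp), ih]

lemma chain (fav : Int) :
    ∀ (k : Nat) (d : Int), d = 51 - (k : Int) →
    ∀ (v : PySem.Set (Int × Int)) (F : List (Int × Int)) (fuel : Nat),
    part2Loop fav (fuel + needed fav k (v, F))
      ((F.flatMap (nbrsL fav)).map (fun q => (q, d))) v
    = PySem.Set.len (iterR fav k (v, F)).1 := by
  intro k
  induction k with
  | zero =>
    intro d hd v F fuel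
    have : d = 51 := by push_cast at hd; omega
    subst this
    exact discardLemma fav _ v fuel
  | succ k ih =>
    intro d hd v F fuel
    have hdlt : d < 51 := by push_cast at hd; omega
    rcases hr : roundP fav (v, F) with ⟨v', F'⟩
    simp only [needed, hr]
    rw [show fuel + ((F.flatMap (nbrsL fav)).length + needed fav k (v', F'))
          = (fuel + needed fav k (v', F')) + (F.flatMap (nbrsL fav)).length by omega]
    rw [show (F.flatMap (nbrsL fav)).map (fun q => (q, d))
          = (F.flatMap (nbrsL fav)).map (fun q => (q, d))
            ++ ([] : List (Int × Int)).map (fun q => (q, d + 1)) by simp]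
    rw [roundLemma fav d hdlt]
    have hproc : procA v (F.flatMap (nbrsL fav)) = (v', F') := hr
    rw [hproc]
    simp only [List.nil_append]
    have hd1 : d + 1 = 51 - (k : Int) := by push_cast at hd ⊢; omega
    rw [ih (d + 1) hd1 v' F' fuel]
    simp only [iterR, roundP, hproc]

lemma flatMap_nbrs_len (fav : Int) (F : List (Int × Int)) :
    (F.flatMap (nbrsL fav)).length ≤ 4 * F.length := by
  induction F with
  | nil => simp
  | cons p F' ih =>
    have h4 : (nbrsL fav p).length ≤ 4 := by
      have := List.length_filter_le
        (fun q => decide (0 ≤ q.1) && decide (0 ≤ q.2) && isOpenSpace q.1 q.2 fav)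
        [(p.1, p.2 + 1), (p.1 + 1, p.2), (p.1, p.2 - 1), (p.1 - 1, p.2)]
      simpa [nbrsL] using this
    simp only [List.flatMap_cons, List.length_append, List.length_cons]
    omega

lemma procA_snd_len (v : PySem.Set (Int × Int)) (L : List (Int × Int)) :
    (procA v L).2.length ≤ L.length := by
  induction L generalizing v with
  | nil => simp [procA]
  | cons p L' ih =>
    by_cases hv : PySem.Set.contains v p = false
    · have hm : p ∉ v := by simpa using hv
      simpa [procA, hm] using ih (PySem.Set.add v p)
    · have hm : p ∈ v := by simpa using hv
      simp only [procA, List.length_cons]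
      rw [if_neg (by simpa using hm)]
      exact le_trans (ih v) (by omega)

lemma needed_le (fav : Int) :
    ∀ (k : Nat) (v : PySem.Set (Int × Int)) (F : List (Int × Int)),
    needed fav k (v, F) ≤ 5 ^ (k + 1) * (F.length + 1) := by
  intro k
  induction k with
  | zero =>
    intro v F
    have := flatMap_nbrs_len fav F
    simp only [needed]
    omega
  | succ k ih =>
    intro v F
    rcases hr : roundP fav (v, F) with ⟨v', F'⟩
    have hlen : F'.length ≤ 4 * F.length := by
      have h1 : F'.length ≤ (F.flatMap (nbrsL fav)).length := by
        have := procA_snd_len v (F.flatMap (nbrsL fav))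
        simp only [roundP] at hr
        rw [hr] at this
        exact this
      exact le_trans h1 (flatMap_nbrs_len fav F)
    have hfm := flatMap_nbrs_len fav F
    have hih := ih v' F'
    have ha : 5 ≤ 5 ^ (k + 1) := by
      calc 5 = 5 ^ 1 := (pow_one 5).symm
      _ ≤ 5 ^ (k + 1) := Nat.pow_le_pow_right (by omega) (by omega)
    simp only [needed, hr]
    have h2 : needed fav k (v', F') ≤ 5 ^ (k + 1) * (4 * F.length + 1) :=
      le_trans hih (Nat.mul_le_mul_left _ (by omega))
    calc (F.flatMap (nbrsL fav)).length + needed fav k (v', F')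
        ≤ 4 * F.length + 5 ^ (k + 1) * (4 * F.length + 1) := by omega
      _ ≤ 5 ^ (k + 1 + 1) * (F.length + 1) := by
          have hps : (5 : Nat) ^ (k + 1 + 1) = 5 ^ (k + 1) * 5 := pow_succ 5 (k + 1)
          rw [hps]
          generalize (5 : Nat) ^ (k + 1) = a at ha ⊢
          nlinarith [ha]

lemma partA_eq (fav : Int) :
    part2 fav = PySem.Set.len
      (iterR fav 50 (PySem.Set.add PySem.Set.empty (1, 1), [((1 : Int), (1 : Int))])).1 := by
  unfold part2
  rw [show (10000000000000000000000000000000000000000 : Nat)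
        = 9999999999999999999999999999999999999999 + 1 from by norm_num]
  rw [part2Loop, if_pos ⟨rfl, by norm_num⟩, compass_foldl]
  simp only [List.nil_append, zero_add]
  have hF : nbrsL fav (1, 1) = ([((1 : Int), (1 : Int))]).flatMap (nbrsL fav) := by simp
  rw [hF]
  have hle : needed fav 50 (PySem.Set.add PySem.Set.empty (1, 1), [((1 : Int), (1 : Int))])
      ≤ 9999999999999999999999999999999999999999 := by
    have := needed_le fav 50 (PySem.Set.add PySem.Set.empty (1, 1)) [((1 : Int), (1 : Int))]
    have h5 : (5 : Nat) ^ (50 + 1) * (([((1 : Int), (1 : Int))]).length + 1)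
        ≤ 9999999999999999999999999999999999999999 := by norm_num
    exact le_trans this h5
  rw [← Nat.sub_add_cancel hle]
  rw [chain fav 50 1 (by norm_num)]

lemma iterR_succ' (fav : Int) (k : Nat) (s : PySem.Set (Int × Int) × List (Int × Int)) :
    iterR fav (k + 1) s = roundP fav (iterR fav k s) := by
  induction k generalizing s with
  | zero => rfl
  | succ k ih => rw [show iterR fav (k + 1 + 1) s = iterR fav (k + 1) (roundP fav s) from rfl, ih]; rfl

-- ---------- the mathematical reachability function both sides compute ----------
def sFun (fav : Int) : Nat → Int → Int → Bool
  | 0, x, y => decide (x = 1) && decide (y = 1)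
  | k + 1, x, y => sFun fav k x y ||
      (decide (0 ≤ x) && decide (0 ≤ y) && isOpenSpace x y fav &&
        (sFun fav k (x - 1) y || sFun fav k (x + 1) y ||
         sFun fav k x (y - 1) || sFun fav k x (y + 1)))

lemma sFun_bound (fav : Int) :
    ∀ (k : Nat) (x y : Int), sFun fav k x y = true →
      0 ≤ x ∧ x ≤ (k : Int) + 1 ∧ 0 ≤ y ∧ y ≤ (k : Int) + 1 := by
  intro k
  induction k with
  | zero =>
    intro x y h
    simp only [sFun, Bool.and_eq_true, decide_eq_true_eq] at h
    omega
  | succ k ih =>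
    intro x y h
    simp only [sFun, Bool.or_eq_true, Bool.and_eq_true, decide_eq_true_eq] at h
    rcases h with h | ⟨⟨⟨hx, hy⟩, _⟩, h⟩
    · have := ih x y h; push_cast; push_cast at this; omega
    · rcases h with ((h | h) | h) | h <;>
        (have := ih _ _ h; push_cast; push_cast at this; omega)

lemma sFun_false_of_big (fav : Int) (k : Nat) (x y : Int)
    (h : ¬ (0 ≤ x ∧ x ≤ (k : Int) + 1 ∧ 0 ≤ y ∧ y ≤ (k : Int) + 1)) :
    sFun fav k x y = false := by
  by_contra hc
  exact h (sFun_bound fav k x y (by simpa using hc))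

-- ---------- B side: the grid after k rounds is sFun sampled on the box ----------
def gridOf (fav : Int) (k : Nat) : List (List Bool) :=
  (List.range 52).map fun (x : Nat) => (List.range 52).map fun (y : Nat) => sFun fav k (x : Int) (y : Int)

lemma gridGet_map (h : Nat → Nat → Bool) (x y : Nat) (hx : x < 52) (hy : y < 52) :
    gridGet ((List.range 52).map (fun i => (List.range 52).map (fun j => h i j))) x y
      = h x y := by
  simp [gridGet, List.getD_eq_getElem?_getD, hx, hy]

lemma stepGrid_gridOf (fav : Int) (k : Nat) (hk : k ≤ 49) :
    stepGrid (openGrid fav) (gridOf fav k) = gridOf fav (k + 1) := by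
  unfold stepGrid openGrid gridOf
  apply List.map_congr_left
  intro x hx
  apply List.map_congr_left
  intro y hy
  rw [List.mem_range] at hx hy
  rw [gridGet_map _ x y hx hy, gridGet_map _ x y hx hy]
  have hL : (decide (0 < x) && gridGet ((List.range 52).map
        (fun (i : Nat) => (List.range 52).map (fun (j : Nat) => sFun fav k (i : Int) (j : Int)))) (x - 1) y)
      = sFun fav k ((x : Int) - 1) (y : Int) := by
    by_cases h : 0 < x
    · rw [gridGet_map _ (x - 1) y (by omega) hy]
      have hc : ((x - 1 : Nat) : Int) = (x : Int) - 1 := by omega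
      simp [h, hc]
    · rw [sFun_false_of_big fav k ((x : Int) - 1) (y : Int) (by omega)]
      simp [h]
  have hR : (decide (x + 1 < 52) && gridGet ((List.range 52).map
        (fun (i : Nat) => (List.range 52).map (fun (j : Nat) => sFun fav k (i : Int) (j : Int)))) (x + 1) y)
      = sFun fav k ((x : Int) + 1) (y : Int) := by
    by_cases h : x + 1 < 52
    · rw [gridGet_map _ (x + 1) y h hy]
      have hc : ((x + 1 : Nat) : Int) = (x : Int) + 1 := by omega
      simp [h, hc]
    · rw [sFun_false_of_big fav k ((x : Int) + 1) (y : Int) (by omega)]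
      simp [h]
  have hD : (decide (0 < y) && gridGet ((List.range 52).map
        (fun (i : Nat) => (List.range 52).map (fun (j : Nat) => sFun fav k (i : Int) (j : Int)))) x (y - 1))
      = sFun fav k (x : Int) ((y : Int) - 1) := by
    by_cases h : 0 < y
    · rw [gridGet_map _ x (y - 1) hx (by omega)]
      have hc : ((y - 1 : Nat) : Int) = (y : Int) - 1 := by omega
      simp [h, hc]
    · rw [sFun_false_of_big fav k (x : Int) ((y : Int) - 1) (by omega)]
      simp [h]
  have hU : (decide (y + 1 < 52) && gridGet ((List.range 52).map
        (fun (i : Nat) => (List.range 52).map (fun (j : Nat) => sFun fav k (i : Int) (j : Int)))) x (y + 1))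
      = sFun fav k (x : Int) ((y : Int) + 1) := by
    by_cases h : y + 1 < 52
    · rw [gridGet_map _ x (y + 1) hx h]
      have hc : ((y + 1 : Nat) : Int) = (y : Int) + 1 := by omega
      simp [h, hc]
    · rw [sFun_false_of_big fav k (x : Int) ((y : Int) + 1) (by omega)]
      simp [h]
  rw [hL, hR, hD, hU]
  simp [sFun, Bool.or_assoc]

lemma foldl_stepGrid (fav : Int) :
    ∀ (n : Nat), n ≤ 50 →
    (List.range n).foldl (fun r _ => stepGrid (openGrid fav) r) (gridOf fav 0) = gridOf fav n := by
  intro n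
  induction n with
  | zero => intro _; rfl
  | succ n ih =>
    intro h
    rw [List.range_succ, List.foldl_append, ih (by omega)]
    simp only [List.foldl_cons, List.foldl_nil]
    exact stepGrid_gridOf fav n (by omega)

-- ---------- procA set semantics ----------
lemma mem_procA_fst (q : Int × Int) :
    ∀ (L : List (Int × Int)) (v : PySem.Set (Int × Int)),
      q ∈ (procA v L).1 ↔ q ∈ v ∨ q ∈ L := by
  intro L
  induction L with
  | nil => intro v; simp [procA]
  | cons p L' ih =>
    intro v
    by_cases hm : p ∈ v
    · rw [show procA v (p :: L') = procA v L' from by simp [procA, hm]]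
      rw [ih]
      simp only [List.mem_cons]
      constructor
      · rintro (h | h) <;> tauto
      · rintro (h | (h | h))
        · tauto
        · subst h; tauto
        · tauto
    · rw [show procA v (p :: L')
          = ((procA (PySem.Set.add v p) L').1, p :: (procA (PySem.Set.add v p) L').2)
          from by simp [procA, hm]]
      simp only
      rw [ih]
      simp only [PySem.Set.mem_add, List.mem_cons]
      tauto

lemma procA_snd_sub_L (q : Int × Int) :
    ∀ (L : List (Int × Int)) (v : PySem.Set (Int × Int)),
      q ∈ (procA v L).2 → q ∈ L := by
  intro L
  induction L with
  | nil => intro v h; simp [procA] at h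
  | cons p L' ih =>
    intro v h
    by_cases hm : p ∈ v
    · rw [show procA v (p :: L') = procA v L' from by simp [procA, hm]] at h
      simp [ih _ h]
    · rw [show procA v (p :: L')
          = ((procA (PySem.Set.add v p) L').1, p :: (procA (PySem.Set.add v p) L').2)
          from by simp [procA, hm]] at h
      simp only [List.mem_cons] at h
      rcases h with h | h
      · simp [h]
      · simp [ih _ h]

lemma procA_snd_sub_fst (q : Int × Int)
    (L : List (Int × Int)) (v : PySem.Set (Int × Int)) :
    q ∈ (procA v L).2 → q ∈ (procA v L).1 := by
  intro h
  rw [mem_procA_fst]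
  right; exact procA_snd_sub_L q L v h

lemma procA_new_mem_snd (q : Int × Int) :
    ∀ (L : List (Int × Int)) (v : PySem.Set (Int × Int)),
      q ∈ (procA v L).1 → q ∉ v → q ∈ (procA v L).2 := by
  intro L
  induction L with
  | nil => intro v h hq; simp [procA] at h; exact absurd h hq
  | cons p L' ih =>
    intro v h hq
    by_cases hm : p ∈ v
    · rw [show procA v (p :: L') = procA v L' from by simp [procA, hm]] at h ⊢
      exact ih _ h hq
    · rw [show procA v (p :: L')
          = ((procA (PySem.Set.add v p) L').1, p :: (procA (PySem.Set.add v p) L').2)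
          from by simp [procA, hm]] at h ⊢
      simp only [List.mem_cons]
      by_cases hqp : q = p
      · exact Or.inl hqp
      · right
        have hq' : q ∉ PySem.Set.add v p := by
          rw [PySem.Set.mem_add]; tauto
        exact ih _ h hq'

lemma procA_fst_nodup :
    ∀ (L : List (Int × Int)) (v : PySem.Set (Int × Int)),
      v.Nodup → (procA v L).1.Nodup := by
  intro L
  induction L with
  | nil => intro v h; simpa [procA] using h
  | cons p L' ih =>
    intro v h
    by_cases hm : p ∈ v
    · rw [show procA v (p :: L') = procA v L' from by simp [procA, hm]]
      exact ih _ h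
    · rw [show procA v (p :: L')
          = ((procA (PySem.Set.add v p) L').1, p :: (procA (PySem.Set.add v p) L').2)
          from by simp [procA, hm]]
      exact ih _ (PySem.Set.nodup_add v p h)

-- ---------- adjacency bookkeeping ----------
lemma mem_nbrsL (fav : Int) (p q : Int × Int) :
    q ∈ nbrsL fav p ↔
      ((q = (p.1, p.2 + 1) ∨ q = (p.1 + 1, p.2) ∨ q = (p.1, p.2 - 1) ∨ q = (p.1 - 1, p.2)) ∧
        (0 ≤ q.1 ∧ 0 ≤ q.2 ∧ isOpenSpace q.1 q.2 fav = true)) := by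
  simp [nbrsL, List.mem_filter, and_assoc]

-- the invariant carried through the rounds
def InvR (fav : Int) (k : Nat) (s : PySem.Set (Int × Int) × List (Int × Int)) : Prop :=
  (∀ q : Int × Int, q ∈ s.1 ↔ sFun fav k q.1 q.2 = true) ∧
  (∀ q ∈ s.2, q ∈ s.1) ∧
  (∀ p ∈ s.1, p ∉ s.2 → ∀ q ∈ nbrsL fav p, q ∈ s.1) ∧
  s.1.Nodup

lemma sFun_mono (fav : Int) (k : Nat) (x y : Int) (h : sFun fav k x y = true) :
    sFun fav (k + 1) x y = true := by
  simp [sFun, h]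

lemma invR_step (fav : Int) (k : Nat) (s : PySem.Set (Int × Int) × List (Int × Int))
    (h : InvR fav k s) : InvR fav (k + 1) (roundP fav s) := by
  rcases s with ⟨v, F⟩
  obtain ⟨hmem, hFv, hcl, hnd⟩ := h
  rcases hr : roundP fav (v, F) with ⟨v', F'⟩
  have hv' : v' = (procA v (F.flatMap (nbrsL fav))).1 := by
    simpa [roundP] using (congrArg Prod.fst hr).symm
  have hF' : F' = (procA v (F.flatMap (nbrsL fav))).2 := by
    simpa [roundP] using (congrArg Prod.snd hr).symm
  have hmem' : ∀ q : Int × Int, q ∈ v' ↔ sFun fav (k + 1) q.1 q.2 = true := by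
    intro q
    rw [hv', mem_procA_fst, List.mem_flatMap]
    constructor
    · rintro (h | ⟨p, hpF, hqn⟩)
      · exact sFun_mono fav k _ _ ((hmem q).mp h)
      · rw [mem_nbrsL] at hqn
        obtain ⟨hadj, hx, hy, hop⟩ := hqn
        have hp : sFun fav k p.1 p.2 = true := (hmem p).mp (hFv p hpF)
        simp only [sFun, Bool.or_eq_true, Bool.and_eq_true, decide_eq_true_eq]
        right
        refine ⟨⟨⟨hx, hy⟩, hop⟩, ?_⟩
        rcases hadj with h | h | h | h <;> subst h <;> simp only []
        · -- q = (p.1, p.2+1): p is q's (y-1) neighbour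
          left; right
          simpa using hp
        · -- q = (p.1+1, p.2): p is q's (x-1) neighbour
          left; left; left
          simpa using hp
        · -- q = (p.1, p.2-1): p is q's (y+1) neighbour
          right
          simpa using hp
        · -- q = (p.1-1, p.2): p is q's (x+1) neighbour
          left; left; right
          simpa using hp
    · intro h
      simp only [sFun, Bool.or_eq_true, Bool.and_eq_true, decide_eq_true_eq] at h
      rcases h with h | ⟨⟨⟨hx, hy⟩, hop⟩, hn⟩
      · left; exact (hmem q).mpr h
      · -- q is good and has a sFun-k neighbour n
        have : ∃ n : Int × Int, sFun fav k n.1 n.2 = true ∧ q ∈ nbrsL fav n := by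
          rcases hn with ((h | h) | h) | h
          · exact ⟨(q.1 - 1, q.2), h, by rw [mem_nbrsL]; exact ⟨by right; left; simp, hx, hy, hop⟩⟩
          · exact ⟨(q.1 + 1, q.2), h, by rw [mem_nbrsL]; exact ⟨by right; right; right; simp, hx, hy, hop⟩⟩
          · exact ⟨(q.1, q.2 - 1), h, by rw [mem_nbrsL]; exact ⟨by left; simp, hx, hy, hop⟩⟩
          · exact ⟨(q.1, q.2 + 1), h, by rw [mem_nbrsL]; exact ⟨by right; right; left; simp, hx, hy, hop⟩⟩
        obtain ⟨n, hns, hqn⟩ := this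
        have hnv : n ∈ v := (hmem n).mpr hns
        by_cases hnF : n ∈ F
        · right; exact ⟨n, hnF, hqn⟩
        · left; exact hcl n hnv hnF q hqn
  refine ⟨hmem', ?_, ?_, ?_⟩
  · intro q hq
    rw [hF'] at hq; rw [hv']
    exact procA_snd_sub_fst q _ _ hq
  · intro p hp hpF' q hqn
    by_cases hpv : p ∈ v
    · by_cases hpF : p ∈ F
      · rw [hv', mem_procA_fst, List.mem_flatMap]
        right; exact ⟨p, hpF, hqn⟩
      · rw [hv', mem_procA_fst]
        left; exact hcl p hpv hpF q hqn
    · exfalso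
      apply hpF'
      rw [hF']
      rw [hv'] at hp
      exact procA_new_mem_snd p _ _ hp hpv
  · rw [hv']; exact procA_fst_nodup _ _ hnd

lemma invR_iter (fav : Int) (k : Nat) :
    InvR fav k (iterR fav k (PySem.Set.add PySem.Set.empty (1, 1), [((1 : Int), (1 : Int))])) := by
  induction k with
  | zero =>
    refine ⟨?_, ?_, ?_, ?_⟩
    · intro q
      show q ∈ PySem.Set.add PySem.Set.empty (1, 1) ↔ _
      rw [PySem.Set.mem_add]
      simp only [sFun, Bool.and_eq_true, decide_eq_true_eq]
      constructor
      · rintro (h | h)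
        · exact absurd h (by simp [PySem.Set.empty])
        · subst h; exact ⟨rfl, rfl⟩
      · rintro ⟨h1, h2⟩
        right
        exact Prod.ext h1 h2
    · intro q hq
      show q ∈ PySem.Set.add PySem.Set.empty (1, 1)
      rw [PySem.Set.mem_add]
      right
      exact List.mem_singleton.mp hq
    · intro p hp hpF
      exfalso
      apply hpF
      show p ∈ [((1 : Int), (1 : Int))]
      have : p ∈ PySem.Set.add PySem.Set.empty (1, 1) := hp
      rw [PySem.Set.mem_add] at this
      rcases this with h | h
      · exact absurd h (by simp [PySem.Set.empty])
      · simp [h]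
    · show (PySem.Set.add PySem.Set.empty (1, 1)).Nodup
      exact PySem.Set.nodup_add _ _ (by simp [PySem.Set.empty])
  | succ k ih =>
    rw [iterR_succ']
    exact invR_step fav k _ ih

-- ---------- counting ----------
lemma countP_flatMap_map (f : Nat → Nat → Bool) (m : List Nat) :
    ∀ (l : List Nat),
    List.countP id (l.flatMap (fun x => m.map (fun y => f x y)))
      = List.countP (fun q : Nat × Nat => f q.1 q.2) (l.flatMap (fun x => m.map (Prod.mk x))) := by
  intro l
  induction l with
  | nil => simp
  | cons x xs ih =>
    simp only [List.flatMap_cons, List.countP_append, ih]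
    congr 1
    rw [List.countP_map, List.countP_map]
    rfl

lemma countP_grid (fav : Int) :
    ((gridOf fav 50).flatMap (fun row => row)).countP id
      = (((List.range 52) ×ˢ (List.range 52)).filter
          (fun q : Nat × Nat => sFun fav 50 (q.1 : Int) (q.2 : Int))).length := by
  rw [← List.countP_eq_length_filter]
  unfold gridOf
  simp only [List.flatMap_map]
  rw [show ((List.range 52) ×ˢ (List.range 52)) =
        (List.range 52).flatMap (fun x => (List.range 52).map (Prod.mk x)) from rfl]
  exact countP_flatMap_map (fun x y => sFun fav 50 (x : Int) (y : Int)) (List.range 52) (List.range 52)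

lemma len_eq_count (fav : Int) :
    PySem.Set.len (iterR fav 50 (PySem.Set.add PySem.Set.empty (1, 1),
        [((1 : Int), (1 : Int))])).1
      = ((((List.range 52) ×ˢ (List.range 52)).filter
          (fun q : Nat × Nat => sFun fav 50 (q.1 : Int) (q.2 : Int))).length : Int) := by
  obtain ⟨hmem, _, _, hnd⟩ := invR_iter fav 50
  set V := (iterR fav 50 (PySem.Set.add PySem.Set.empty (1, 1), [((1 : Int), (1 : Int))])).1 with hV
  set W := ((((List.range 52) ×ˢ (List.range 52)).filter
      (fun q : Nat × Nat => sFun fav 50 (q.1 : Int) (q.2 : Int))).map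
      (fun q : Nat × Nat => ((q.1 : Int), (q.2 : Int)))) with hW
  have hWnd : W.Nodup := by
    rw [hW]
    apply List.Nodup.map
    · intro a b hab
      have h1 := congrArg Prod.fst hab
      have h2 := congrArg Prod.snd hab
      simp only at h1 h2
      exact Prod.ext (by exact_mod_cast h1) (by exact_mod_cast h2)
    · exact List.Nodup.filter _ (List.Nodup.product (List.nodup_range) (List.nodup_range))
  have hsame : ∀ r : Int × Int, r ∈ V ↔ r ∈ W := by
    intro r
    rw [hmem r, hW]
    constructor
    · intro h
      obtain ⟨hx0, hx1, hy0, hy1⟩ := sFun_bound fav 50 r.1 r.2 h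
      refine List.mem_map.mpr ⟨(r.1.toNat, r.2.toNat), List.mem_filter.mpr ⟨?_, ?_⟩, ?_⟩
      · exact List.pair_mem_product.mpr
          ⟨List.mem_range.mpr (by omega), List.mem_range.mpr (by omega)⟩
      · show sFun fav 50 ((r.1.toNat : Nat) : Int) ((r.2.toNat : Nat) : Int) = true
        rw [Int.toNat_of_nonneg hx0, Int.toNat_of_nonneg hy0]
        exact h
      · show ((r.1.toNat : Int), (r.2.toNat : Int)) = r
        rw [Int.toNat_of_nonneg hx0, Int.toNat_of_nonneg hy0]
    · intro h
      obtain ⟨p, hp, hr⟩ := List.mem_map.mp h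
      obtain ⟨_, hs⟩ := List.mem_filter.mp hp
      rw [← hr]
      simpa using hs
  have hperm : V.Perm W := (List.perm_ext_iff_of_nodup hnd hWnd).mpr hsame
  have hlen : V.length = W.length := hperm.length_eq
  have hWlen : W.length = (((List.range 52) ×ˢ (List.range 52)).filter
      (fun q : Nat × Nat => sFun fav 50 (q.1 : Int) (q.2 : Int))).length := by
    rw [hW, List.length_map]
  show ((V.length : Nat) : Int) = _
  rw [hlen, hWlen]

lemma partB_eq (fav : Int) :
    part2_alt fav = ((((List.range 52) ×ˢ (List.range 52)).filter
        (fun q : Nat × Nat => sFun fav 50 (q.1 : Int) (q.2 : Int))).length : Int) := by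
  show ((((List.range 50).foldl (fun r _ => stepGrid (openGrid fav) r)
      ((List.range 52).map fun x => (List.range 52).map fun y =>
        decide (x = 1) && decide (y = 1))).flatMap (fun row => row)).countP id : Int) = _
  have hinit : ((List.range 52).map fun x => (List.range 52).map fun y =>
      decide (x = 1) && decide (y = 1)) = gridOf fav 0 := by
    unfold gridOf
    apply List.map_congr_left
    intro x _
    apply List.map_congr_left
    intro y _
    simp only [sFun]
    congr 1 <;> simp
  rw [hinit, foldl_stepGrid fav 50 (le_refl 50), countP_grid]

-- ===== VERDICT (by name: the statement is the Claim_ definition above) =====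
theorem part2_spec : Claim_equal_part2 := by
  intro fav _
  unfold Spec_part2
  rw [partA_eq, partB_eq, len_eq_count]
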